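-- pv_equiv track=rewrite | github.com/BrooksLabUCSC/flair | src/flair/flair_align.py | bed_from_cigar
-- ===== SOURCE A (Python) =====
-- def intronChainToestarts(ichain, start, end):
--     esizes, estarts = [], [0,]
--     for i in ichain:
--         esizes.append(i[0] - (start + estarts[-1]))
--         estarts.append(i[1] - start)
--     esizes.append(end - (start + estarts[-1]))
--     return esizes, estarts
--
-- def bed_from_cigar(alignstart, is_reverse, cigartuples, readname, referencename, qualscore, juncDirection):
--     positiveTxn = "27,158,119"  # green
--     negativeTxn = "217,95,2"  # orange
--     unknownTxn = "99,99,99"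
--     refpos = alignstart
--     intronblocks = []
--     hasmatch = False
--     for block in cigartuples:
--         if block[0] == 3 and hasmatch: #intron, pay attention
--             intronblocks.append([refpos, refpos + block[1]])
--             refpos += block[1]
--         elif block[0] in {0, 7, 8, 2}:  # consumes reference
--             refpos += block[1]
--             if block[0] in {0, 7, 8}: hasmatch = True#match
--     # dirtowrite = '-' if is_reverse else '+'
--     #chr1   476363  497259  ENST00000455464.7_ENSG00000237094.12    1000    -       476363  497259  0       3       582,169,151,    0,8676,20745,
--     esizes, estarts = intronChainToestarts(intronblocks,alignstart, refpos)
--     rgbcolor = unknownTxn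
--     if juncDirection == "+": rgbcolor = positiveTxn
--     elif juncDirection == "-": rgbcolor = negativeTxn
--     else:
--         juncDirection = "-" if is_reverse else "+"
--     outline = [referencename, str(alignstart), str(refpos), readname, str(qualscore), juncDirection, str(alignstart), str(refpos), rgbcolor, str(len(intronblocks) + 1), ','.join([str(x) for x in esizes]) + ',', ','.join([str(x) for x in estarts]) + ',']
--     return outline
-- ===== SOURCE B (Python) =====
-- def bed_from_cigar(alignstart, is_reverse, cigartuples, readname, referencename, qualscore, juncDirection):
--     # single pass: build exon sizes/starts directly, no intermediate intron list
--     refpos = alignstart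
--     exonstart = alignstart
--     hasmatch = False
--     esizes, estarts = [], []
--     for op, length in cigartuples:
--         if op == 0 or op == 7 or op == 8:
--             refpos += length
--             hasmatch = True
--         elif op == 2:
--             refpos += length
--         elif op == 3 and hasmatch:
--             esizes.append(refpos - exonstart)
--             estarts.append(exonstart - alignstart)
--             refpos += length
--             exonstart = refpos
--     esizes.append(refpos - exonstart)
--     estarts.append(exonstart - alignstart)
--     if juncDirection == "+":
--         rgbcolor = "27,158,119"
--     elif juncDirection == "-":
--         rgbcolor = "217,95,2"
--     else:
--         rgbcolor = "99,99,99"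
--         juncDirection = "-" if is_reverse else "+"
--     return [referencename, str(alignstart), str(refpos), readname, str(qualscore),
--             juncDirection, str(alignstart), str(refpos), rgbcolor, str(len(estarts)),
--             ','.join(str(x) for x in esizes) + ',',
--             ','.join(str(x) for x in estarts) + ',']
-- ===== Notes on version B (the rewrite author's own statement) =====
-- stated objective: simpler
-- what changed: Single pass over cigartuples that emits exon sizes/starts directly, eliminating the intermediate intronblocks list and the intronChainToestarts helper with its getLast-based second pass.
import Mathlib
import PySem

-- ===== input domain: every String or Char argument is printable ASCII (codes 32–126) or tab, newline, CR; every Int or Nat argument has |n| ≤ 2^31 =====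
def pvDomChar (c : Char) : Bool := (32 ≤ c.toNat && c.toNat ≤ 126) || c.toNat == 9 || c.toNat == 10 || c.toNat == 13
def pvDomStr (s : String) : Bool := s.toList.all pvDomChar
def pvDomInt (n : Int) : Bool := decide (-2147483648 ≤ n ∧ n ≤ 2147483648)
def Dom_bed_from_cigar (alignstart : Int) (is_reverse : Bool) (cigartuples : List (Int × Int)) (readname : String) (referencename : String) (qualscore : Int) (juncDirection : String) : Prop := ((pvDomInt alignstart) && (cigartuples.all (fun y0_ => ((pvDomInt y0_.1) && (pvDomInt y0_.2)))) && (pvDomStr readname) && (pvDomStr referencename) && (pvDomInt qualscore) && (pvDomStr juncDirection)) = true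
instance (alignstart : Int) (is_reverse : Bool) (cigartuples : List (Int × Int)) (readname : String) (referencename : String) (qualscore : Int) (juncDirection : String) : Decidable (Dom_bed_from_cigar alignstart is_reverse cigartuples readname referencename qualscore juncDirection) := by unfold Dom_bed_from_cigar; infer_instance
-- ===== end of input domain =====

-- B replaces the intronblocks list + two-pass intronChainToestarts helper by one pass that
-- emits exon sizes/starts directly (simpler decomposition; same return value).
-- ===== PORT A =====
def intronChainToestarts (ichain : List (Int × Int)) (start e : Int) : List Int × List Int :=
  let p := ichain.foldl (fun (acc : List Int × List Int) i =>
    (acc.1 ++ [i.1 - (start + acc.2.getLast!)], acc.2 ++ [i.2 - start])) ([], [0])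
  (p.1 ++ [e - (start + p.2.getLast!)], p.2)

def pvAstep (s : Int × List (Int × Int) × Bool) (b : Int × Int) : Int × List (Int × Int) × Bool :=
  if b.1 == 3 && s.2.2 then (s.1 + b.2, s.2.1 ++ [(s.1, s.1 + b.2)], s.2.2)
  else if b.1 == 0 || b.1 == 7 || b.1 == 8 || b.1 == 2 then
    (s.1 + b.2, s.2.1, if b.1 == 0 || b.1 == 7 || b.1 == 8 then true else s.2.2)
  else s

def bed_from_cigar (alignstart : Int) (is_reverse : Bool) (cigartuples : List (Int × Int)) (readname : String) (referencename : String) (qualscore : Int) (juncDirection : String) : List String :=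
  let positiveTxn := "27,158,119"
  let negativeTxn := "217,95,2"
  let unknownTxn := "99,99,99"
  let s := cigartuples.foldl pvAstep (alignstart, ([], false))
  let refpos := s.1
  let intronblocks := s.2.1
  let p := intronChainToestarts intronblocks alignstart refpos
  let esizes := p.1
  let estarts := p.2
  let rgbcolor := if juncDirection == "+" then positiveTxn
    else if juncDirection == "-" then negativeTxn else unknownTxn
  let juncDirection := if juncDirection == "+" || juncDirection == "-" then juncDirection
    else (if is_reverse then "-" else "+")
  [referencename, PySem.Int.toStr alignstart, PySem.Int.toStr refpos, readname,
   PySem.Int.toStr qualscore, juncDirection, PySem.Int.toStr alignstart, PySem.Int.toStr refpos,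
   rgbcolor, PySem.Int.toStr (Int.ofNat intronblocks.length + 1),
   String.intercalate "," (esizes.map PySem.Int.toStr) ++ ",",
   String.intercalate "," (estarts.map PySem.Int.toStr) ++ ","]

-- ===== PORT B =====
def pvBstep (alignstart : Int) (s : Int × Bool × Int × List Int × List Int) (b : Int × Int) :
    Int × Bool × Int × List Int × List Int :=
  match s with
  | (refpos, hm, exonstart, es, et) =>
    if b.1 == 0 || b.1 == 7 || b.1 == 8 then (refpos + b.2, true, exonstart, es, et)
    else if b.1 == 2 then (refpos + b.2, hm, exonstart, es, et)
    else if b.1 == 3 && hm then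
      (refpos + b.2, hm, refpos + b.2, es ++ [refpos - exonstart], et ++ [exonstart - alignstart])
    else (refpos, hm, exonstart, es, et)

def bed_from_cigar_alt (alignstart : Int) (is_reverse : Bool) (cigartuples : List (Int × Int)) (readname : String) (referencename : String) (qualscore : Int) (juncDirection : String) : List String :=
  let s := cigartuples.foldl (pvBstep alignstart) (alignstart, false, alignstart, [], [])
  match s with
  | (refpos, _, exonstart, es, et) =>
    let esizes := es ++ [refpos - exonstart]
    let estarts := et ++ [exonstart - alignstart]
    let rgbcolor := if juncDirection == "+" then "27,158,119"
      else if juncDirection == "-" then "217,95,2" else "99,99,99"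
    let juncDirection := if juncDirection == "+" || juncDirection == "-" then juncDirection
      else (if is_reverse then "-" else "+")
    [referencename, PySem.Int.toStr alignstart, PySem.Int.toStr refpos, readname,
     PySem.Int.toStr qualscore, juncDirection, PySem.Int.toStr alignstart, PySem.Int.toStr refpos,
     rgbcolor, PySem.Int.toStr (Int.ofNat estarts.length),
     String.intercalate "," (esizes.map PySem.Int.toStr) ++ ",",
     String.intercalate "," (estarts.map PySem.Int.toStr) ++ ","]

-- ===== PRECONDITION & SPEC =====
def Spec_bed_from_cigar (alignstart : Int) (is_reverse : Bool) (cigartuples : List (Int × Int)) (readname : String) (referencename : String) (qualscore : Int) (juncDirection : String) (out : List String) : Prop := out = bed_from_cigar_alt alignstart is_reverse cigartuples readname referencename qualscore juncDirection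
instance (alignstart : Int) (is_reverse : Bool) (cigartuples : List (Int × Int)) (readname : String) (referencename : String) (qualscore : Int) (juncDirection : String) (out : List String) : Decidable (Spec_bed_from_cigar alignstart is_reverse cigartuples readname referencename qualscore juncDirection out) := by unfold Spec_bed_from_cigar; infer_instance

-- ===== CLAIM (what is proved, stated in full; the proofs are below) =====
def Claim_equal_bed_from_cigar : Prop := ∀ (alignstart : Int) (is_reverse : Bool) (cigartuples : List (Int × Int)) (readname : String) (referencename : String) (qualscore : Int) (juncDirection : String), Dom_bed_from_cigar alignstart is_reverse cigartuples readname referencename qualscore juncDirection → Spec_bed_from_cigar alignstart is_reverse cigartuples readname referencename qualscore juncDirection (bed_from_cigar alignstart is_reverse cigartuples readname referencename qualscore juncDirection)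

-- ===== LEMMAS AND PROOFS =====

-- ===== VERDICT (by name: the statement is the Claim_ definition above) =====

-- The fold part of intronChainToestarts, named for the invariant lemma.
def pvIcFold (start : Int) (ichain : List (Int × Int)) : List Int × List Int :=
  ichain.foldl (fun (acc : List Int × List Int) i =>
    (acc.1 ++ [i.1 - (start + acc.2.getLast!)], acc.2 ++ [i.2 - start])) ([], [0])

theorem pvIcFold_spec (start : Int) (ichain : List (Int × Int)) (e : Int) :
    intronChainToestarts ichain start e =
      ((pvIcFold start ichain).1 ++ [e - (start + (pvIcFold start ichain).2.getLast!)],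
       (pvIcFold start ichain).2) := rfl

-- Loop invariant: running A's fold and B's fold from linked states keeps them linked.
theorem pvIcFold_len_aux (start : Int) :
    ∀ (l : List (Int × Int)) (acc : List Int × List Int),
    (l.foldl (fun (acc : List Int × List Int) i =>
      (acc.1 ++ [i.1 - (start + acc.2.getLast!)], acc.2 ++ [i.2 - start])) acc).2.length
      = acc.2.length + l.length := by
  intro l
  induction l with
  | nil => intro acc; simp
  | cons x xs ih => intro acc; rw [List.foldl_cons, ih]; simp; omega

theorem pvIcFold_len2 (start : Int) (l : List (Int × Int)) :
    (pvIcFold start l).2.length = l.length + 1 := by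
  unfold pvIcFold
  rw [pvIcFold_len_aux]
  simp
  omega

theorem pv_inv (alignstart : Int) (cig : List (Int × Int)) :
    ∀ (refpos : Int) (hm : Bool) (exonstart : Int) (ib : List (Int × Int)) (es et : List Int),
    pvIcFold alignstart ib = (es, et ++ [exonstart - alignstart]) →
    (cig.foldl pvAstep (refpos, ib, hm)).1 = (cig.foldl (pvBstep alignstart) (refpos, hm, exonstart, es, et)).1 ∧
    (cig.foldl pvAstep (refpos, ib, hm)).2.2 = (cig.foldl (pvBstep alignstart) (refpos, hm, exonstart, es, et)).2.1 ∧
    pvIcFold alignstart (cig.foldl pvAstep (refpos, ib, hm)).2.1 =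
      ((cig.foldl (pvBstep alignstart) (refpos, hm, exonstart, es, et)).2.2.2.1,
       (cig.foldl (pvBstep alignstart) (refpos, hm, exonstart, es, et)).2.2.2.2
         ++ [(cig.foldl (pvBstep alignstart) (refpos, hm, exonstart, es, et)).2.2.1 - alignstart]) := by
  induction cig with
  | nil => intro refpos hm exonstart ib es et h; exact ⟨rfl, rfl, h⟩
  | cons b rest ih =>
    intro refpos hm exonstart ib es et h
    simp only [List.foldl_cons]
    by_cases h078 : (b.1 == 0 || b.1 == 7 || b.1 == 8) = true
    · have hA : pvAstep (refpos, ib, hm) b = (refpos + b.2, ib, true) := by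
        have h3 : (b.1 == 3) = false := by
          simp only [Bool.or_eq_true, beq_iff_eq] at h078 ⊢
          simp only [beq_eq_false_iff_ne]; omega
        simp [pvAstep, h3, h078]
      have hB : pvBstep alignstart (refpos, hm, exonstart, es, et) b
          = (refpos + b.2, true, exonstart, es, et) := by simp [pvBstep, h078]
      rw [hA, hB]; exact ih _ _ _ _ _ _ h
    · by_cases h2 : (b.1 == 2) = true
      · have hA : pvAstep (refpos, ib, hm) b = (refpos + b.2, ib, hm) := by
          have h3 : (b.1 == 3) = false := by
            simp only [beq_iff_eq] at h2; simp only [beq_eq_false_iff_ne]; omega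
          simp [pvAstep, h3, h078, h2]
        have hB : pvBstep alignstart (refpos, hm, exonstart, es, et) b
            = (refpos + b.2, hm, exonstart, es, et) := by simp [pvBstep, h078, h2]
        rw [hA, hB]; exact ih _ _ _ _ _ _ h
      · by_cases h3m : ((b.1 == 3) && hm) = true
        · have hA : pvAstep (refpos, ib, hm) b
              = (refpos + b.2, ib ++ [(refpos, refpos + b.2)], hm) := by
            simp only [pvAstep, h3m, if_pos]
          have hB : pvBstep alignstart (refpos, hm, exonstart, es, et) b
              = (refpos + b.2, hm, refpos + b.2, es ++ [refpos - exonstart],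
                 et ++ [exonstart - alignstart]) := by
            simp [pvBstep, h078, h2, h3m]
          rw [hA, hB]
          apply ih
          · show pvIcFold alignstart (ib ++ [(refpos, refpos + b.2)]) = _
            unfold pvIcFold at h ⊢
            rw [List.foldl_append, h]
            have hg : (et ++ [exonstart - alignstart]).getLast! = exonstart - alignstart := by
              simp [List.getLast!_eq_getLast?_getD]
            simp only [List.foldl_cons, List.foldl_nil, hg]
            have he : alignstart + (exonstart - alignstart) = exonstart := by ring
            rw [he]
        · have hA : pvAstep (refpos, ib, hm) b = (refpos, ib, hm) := by
            simp [pvAstep, h3m, h078, h2]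
          have hB : pvBstep alignstart (refpos, hm, exonstart, es, et) b
              = (refpos, hm, exonstart, es, et) := by
            simp [pvBstep, h078, h2, h3m]
          rw [hA, hB]; exact ih _ _ _ _ _ _ h

theorem bed_from_cigar_spec : Claim_equal_bed_from_cigar := by
  intro alignstart is_reverse cigartuples readname referencename qualscore juncDirection _
  unfold Spec_bed_from_cigar bed_from_cigar bed_from_cigar_alt
  obtain ⟨h1, h2, h3⟩ := pv_inv alignstart cigartuples alignstart false alignstart [] [] []
    (by simp [pvIcFold])
  rcases hB : cigartuples.foldl (pvBstep alignstart) (alignstart, false, alignstart, [], [])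
    with ⟨refB, hmB, exB, esB, etB⟩
  rw [hB] at h1 h3
  simp only [pvIcFold_spec, h3]
  simp only [h1]
  have hg : (etB ++ [exB - alignstart]).getLast! = exB - alignstart := by
    simp [List.getLast!_eq_getLast?_getD]
  have he : alignstart + (exB - alignstart) = exB := by ring
  have hlen : Int.ofNat (cigartuples.foldl pvAstep (alignstart, ([], false))).2.1.length + 1
      = Int.ofNat (etB ++ [exB - alignstart]).length := by
    have h5 := congrArg (fun p => p.2.length) h3
    simp only [pvIcFold_len2] at h5
    simp at h5 ⊢; omega
  rw [hg, he, hlen]
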